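-- pv_equiv track=rewrite | github.com/Informfully/Challenges | newsimages25/workflows/DACS-UM-RTL_RETRIEVAL/tests/test_siglip_models.py | _get_random_text_batch
-- ===== SOURCE A (Python) =====
-- def _get_random_text_batch(batch_size: int):
--     prompts = [
--         "A photo of a cat",
--         "A photo of a dog",
--         "A photo of a bird",
--         "A photo of a fish",
--         "A photo of a horse",
--     ]
--     return [prompts[i % len(prompts)] for i in range(batch_size)]
-- ===== SOURCE B (Python) =====
-- def _get_random_text_batch(batch_size: int):
--     prompts = [
--         "A photo of a cat",
--         "A photo of a dog",
--         "A photo of a bird",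
--         "A photo of a fish",
--         "A photo of a horse",
--     ]
--     reps = batch_size // len(prompts) + 1
--     return (prompts * reps)[:batch_size]
-- ===== Notes on version B (the rewrite author's own statement) =====
-- stated objective: simpler
-- what changed: Replaces the per-element modular-indexing comprehension with one list multiplication (full repetitions count = batch_size//5 + 1) followed by a slice to batch_size.
import Mathlib
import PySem

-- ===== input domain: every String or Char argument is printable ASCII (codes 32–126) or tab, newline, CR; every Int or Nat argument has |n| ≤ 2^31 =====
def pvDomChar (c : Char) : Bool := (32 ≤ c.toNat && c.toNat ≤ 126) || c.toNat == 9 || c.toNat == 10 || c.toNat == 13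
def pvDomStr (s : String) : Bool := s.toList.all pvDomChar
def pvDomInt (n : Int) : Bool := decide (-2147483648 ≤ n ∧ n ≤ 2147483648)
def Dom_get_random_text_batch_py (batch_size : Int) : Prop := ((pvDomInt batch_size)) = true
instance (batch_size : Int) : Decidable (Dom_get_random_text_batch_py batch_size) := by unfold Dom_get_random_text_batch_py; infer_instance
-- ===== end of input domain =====

-- B builds the batch by one list multiplication plus a slice instead of per-element modular indexing (objective: simpler).

-- ===== PORT A =====
def pvPrompts : List String :=
  ["A photo of a cat", "A photo of a dog", "A photo of a bird",
   "A photo of a fish", "A photo of a horse"]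

def get_random_text_batch_py (batch_size : Int) : List String :=
  (PySem.List.pyRange 0 batch_size 1).map
    (fun i => PySem.List.pyGetD pvPrompts (PySem.Int.mod i (pvPrompts.length : Int)) "")

-- ===== PORT B =====
def get_random_text_batch_py_alt (batch_size : Int) : List String :=
  let reps : Int := PySem.Int.floordiv batch_size (pvPrompts.length : Int) + 1
  -- 'prompts * reps' = reps concatenated copies (empty for reps ≤ 0), then '[:batch_size]'
  PySem.List.slice ((List.replicate reps.toNat pvPrompts).flatten) none (some batch_size)

-- ===== PRECONDITION & SPEC =====
def Spec_get_random_text_batch_py (batch_size : Int) (out : List String) : Prop := out = get_random_text_batch_py_alt batch_size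
instance (batch_size : Int) (out : List String) : Decidable (Spec_get_random_text_batch_py batch_size out) := by unfold Spec_get_random_text_batch_py; infer_instance

-- ===== CLAIM (what is proved, stated in full; the proofs are below) =====
def Claim_equal_get_random_text_batch_py : Prop := ∀ (batch_size : Int), Dom_get_random_text_batch_py batch_size → Spec_get_random_text_batch_py batch_size (get_random_text_batch_py batch_size)

-- ===== LEMMAS AND PROOFS =====

-- element i of reps concatenated copies of the prompt list is prompt i % 5
theorem pv_flatten_replicate_getElem? (m i : ℕ) (hi : i < m * 5) :
    ((List.replicate m pvPrompts).flatten)[i]? = pvPrompts[i % 5]? := by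
  induction m generalizing i with
  | zero => omega
  | succ m ih =>
    have hlen : pvPrompts.length = 5 := rfl
    rw [List.replicate_succ, List.flatten_cons, List.getElem?_append, hlen]
    by_cases h : i < 5
    · rw [if_pos h, Nat.mod_eq_of_lt h]
    · rw [if_neg h, ih (i - 5) (by omega)]
      have hm : (i - 5) % 5 = i % 5 := by omega
      rw [hm]

theorem pv_eq_nat (n : ℕ) :
    get_random_text_batch_py (n : Int) = get_random_text_batch_py_alt (n : Int) := by
  unfold get_random_text_batch_py get_random_text_batch_py_alt
  have hlen : pvPrompts.length = 5 := rfl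
  rw [hlen]
  simp only [PySem.Int.floordiv_natCast]
  have hreps : (((n / 5 : ℕ) : Int) + 1).toNat = n / 5 + 1 := by omega
  rw [hreps, PySem.List.slice_to_natCast, PySem.List.pyRange_one]
  simp only [sub_zero, Int.toNat_natCast, zero_add]
  apply List.ext_getElem?
  intro i
  by_cases hi : i < n
  · rw [List.getElem?_take_of_lt hi,
      pv_flatten_replicate_getElem? (n / 5 + 1) i (by omega)]
    rw [List.getElem?_map, List.getElem?_map, List.getElem?_range hi]
    have hmod : PySem.Int.mod ((i : ℕ) : Int) ((5 : ℕ) : Int) = ((i % 5 : ℕ) : Int) :=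
      PySem.Int.mod_natCast i 5
    simp only [Option.map_some]
    rw [hmod, PySem.List.pyGetD_natCast]
    have h5 : i % 5 < pvPrompts.length := by rw [hlen]; omega
    rw [List.getD_eq_getElem _ _ h5, List.getElem?_eq_getElem h5]
  · have hle : n ≤ i := Nat.le_of_not_lt hi
    rw [List.getElem?_eq_none (by simpa using hle),
      List.getElem?_eq_none (le_trans (List.length_take_le _ _) hle)]

theorem pv_eq_nonpos (b : Int) (hb : b ≤ 0) :
    get_random_text_batch_py b = get_random_text_batch_py_alt b := by
  unfold get_random_text_batch_py get_random_text_batch_py_alt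
  rw [PySem.List.pyRange_one_eq_nil hb, List.map_nil]
  by_cases h0 : b = 0
  · subst h0; decide
  · have hneg : b < 0 := lt_of_le_of_ne hb h0
    have hlen : pvPrompts.length = 5 := rfl
    rw [hlen]
    have hfd : (PySem.Int.floordiv b ((5 : ℕ) : Int) + 1).toNat = 0 := by
      have h5 : ((5 : ℕ) : Int) = (5 : Int) := rfl
      rw [h5]
      have := (PySem.Int.floordiv_lt_iff_lt_mul (a := b) (b := 5) (q := 0)
        (by omega)).mpr (by omega)
      omega
    show ([] : List String) = PySem.List.slice
      ((List.replicate (PySem.Int.floordiv b ((5 : ℕ) : Int) + 1).toNat pvPrompts).flatten)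
      none (some b)
    rw [hfd]
    simp [PySem.List.slice]

-- ===== VERDICT (by name: the statement is the Claim_ definition above) =====
theorem get_random_text_batch_py_spec : Claim_equal_get_random_text_batch_py := by
  intro b _
  unfold Spec_get_random_text_batch_py
  rcases (by omega : b ≤ 0 ∨ 0 < b) with hb | hb
  · exact pv_eq_nonpos b hb
  · have hb' : b = ((b.toNat : ℕ) : Int) := (Int.toNat_of_nonneg (le_of_lt hb)).symm
    rw [hb']
    exact pv_eq_nat b.toNat
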